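-- pv_equiv track=rewrite | github.com/Azriel1605/COMPROG | 6 kyu/simple_array_rotaion.py | solve
-- ===== SOURCE A (Python) =====
-- def solve(arr):
--     if arr == sorted(arr):
--         return "A"
--     if arr == sorted(arr, reverse=True):
--         return "D"
--     big = arr[0]
--     pointer = float('-inf')
--     for num in arr:
--         if num > big:
--             pointer = num
--             big = num
--
--
--         if num < big:
--             if num < pointer:
--                 return 'RD'
--             return 'RA'
--
--         if big < num:
--             return 'RD'
-- ===== SOURCE B (Python) =====
-- def solve(arr):
--     if all(x <= y for x, y in zip(arr, arr[1:])):
--         return "A"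
--     if all(x >= y for x, y in zip(arr, arr[1:])):
--         return "D"
--     # not non-decreasing, so a descent from the running maximum exists
--     m = arr[0]
--     rose = False
--     for num in arr[1:]:
--         if num > m:
--             m = num
--             rose = True
--         elif num < m:
--             return "RD" if rose else "RA"
-- ===== Notes on version B (the rewrite author's own statement) =====
-- stated objective: alternative
-- what changed: B replaces the two sort-and-compare tests with linear adjacent-pair scans and replaces A's float('-inf') pointer bookkeeping with a boolean 'rose' flag in the rotation scan; asymptotically O(n) vs O(n log n), but CPython's C sorted() keeps A at least as fast in practice.
import Mathlib
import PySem

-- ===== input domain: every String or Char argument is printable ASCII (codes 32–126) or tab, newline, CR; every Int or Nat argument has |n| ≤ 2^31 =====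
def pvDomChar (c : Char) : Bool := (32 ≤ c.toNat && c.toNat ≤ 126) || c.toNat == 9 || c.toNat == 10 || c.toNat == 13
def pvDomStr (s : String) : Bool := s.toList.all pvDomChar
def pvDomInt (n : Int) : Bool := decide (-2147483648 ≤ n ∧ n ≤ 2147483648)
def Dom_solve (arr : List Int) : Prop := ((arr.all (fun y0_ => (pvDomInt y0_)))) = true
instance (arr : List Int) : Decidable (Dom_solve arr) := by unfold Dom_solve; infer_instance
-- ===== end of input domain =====

-- B replaces A's two sort-and-compare tests by linear adjacent-pair scans and A's
-- float('-inf') pointer by a boolean flag in the rotation scan (objective: alternative).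


-- ===== PORT A =====
-- Python's pointer starts at float('-inf'); on Int inputs this is exactly Option Int with
-- none = -inf (num < -inf is always False), so the comparison below is exact.
def solveLtPointer (num : Int) (p : Option Int) : Bool :=
  match p with
  | none => false
  | some v => decide (num < v)

def solveLoop (big : Int) (pointer : Option Int) : List Int → String
  | [] => ""          -- Python falls off the loop (returns None); proved unreachable below
  | num :: rest =>
    let st := if num > big then (num, some num) else (big, pointer)
    if num < st.1 then
      (if solveLtPointer num st.2 then "RD" else "RA")
    else if st.1 < num then "RD"
    else solveLoop st.1 st.2 rest

def solve (arr : List Int) : String :=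
  if arr = PySem.List.sorted arr (fun x => x) false then "A"
  else if arr = PySem.List.sorted arr (fun x => x) true then "D"
  else
    match arr with
    | [] => ""        -- arr[0] would raise; unreachable since [] equals sorted([])
    | a :: _ => solveLoop a none arr

-- ===== PORT B =====
def solveAltLoop (m : Int) (rose : Bool) : List Int → String
  | [] => ""          -- Python falls off the loop (returns None); unreachable, as in A
  | num :: rest =>
    if num > m then solveAltLoop num true rest
    else if num < m then (if rose then "RD" else "RA")
    else solveAltLoop m rose rest

def solve_alt (arr : List Int) : String :=
  -- arr[1:] = PySem.List.slice arr (some 1) none; it is evaluated twice in Source B too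
  if (arr.zip (PySem.List.slice arr (some 1) none)).all (fun p => decide (p.1 ≤ p.2)) then "A"
  else if (arr.zip (PySem.List.slice arr (some 1) none)).all (fun p => decide (p.1 ≥ p.2)) then "D"
  else
    match arr with
    | [] => ""        -- unreachable: the empty list passes the first test
    | a :: rest => solveAltLoop a false rest

-- ===== PRECONDITION & SPEC =====
def Spec_solve (arr : List Int) (out : String) : Prop := out = solve_alt arr
instance (arr : List Int) (out : String) : Decidable (Spec_solve arr out) := by unfold Spec_solve; infer_instance

-- ===== CLAIM (what is proved, stated in full; the proofs are below) =====
def Claim_equal_solve : Prop := ∀ (arr : List Int), Dom_solve arr → Spec_solve arr (solve arr)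

-- ===== LEMMAS AND PROOFS =====

-- arr == sorted(arr) is exactly pairwise (adjacent) non-decrease
theorem sorted_id_iff_pairwise (arr : List Int) :
    arr = PySem.List.sorted arr (fun x => x) false ↔ arr.Pairwise (· ≤ ·) := by
  constructor
  · intro h
    have := PySem.List.sorted_pairwise (xs := arr) (key := fun x => x)
    rw [← h] at this
    exact this
  · intro h
    exact (PySem.List.sorted_eq_self_of_pairwise (xs := arr) (key := fun x => x) h).symm

theorem sorted_id_rev_iff_pairwise (arr : List Int) :
    arr = PySem.List.sorted arr (fun x => x) true ↔ arr.Pairwise (· ≥ ·) := by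
  constructor
  · intro h
    have := PySem.List.sorted_pairwise_rev (xs := arr) (key := fun x => x)
    rw [← h] at this
    exact this
  · intro h
    exact (PySem.List.sorted_rev_eq_self_of_pairwise (xs := arr) (key := fun x => x) h).symm

-- the zip-with-tail all-test of Source B is adjacent chaining, hence Pairwise (≤/≥ transitive)
theorem zip_all_le_iff (arr : List Int) :
    ((arr.zip arr.tail).all (fun p => decide (p.1 ≤ p.2)) = true) ↔ arr.Pairwise (· ≤ ·) := by
  rw [← List.isChain_iff_pairwise]
  induction arr with
  | nil => simp
  | cons a rest ih =>
    cases rest with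
    | nil => simp
    | cons b t =>
      simp only [List.tail_cons, List.zip_cons_cons, List.all_cons, Bool.and_eq_true,
        List.isChain_cons_cons, decide_eq_true_eq]
      exact and_congr Iff.rfl (by simpa using ih)

theorem zip_all_ge_iff (arr : List Int) :
    ((arr.zip (arr.tail)).all (fun p => decide (p.1 ≥ p.2)) = true) ↔ arr.Pairwise (· ≥ ·) := by
  rw [← List.isChain_iff_pairwise]
  induction arr with
  | nil => simp
  | cons a rest ih =>
    cases rest with
    | nil => simp
    | cons b t =>
      simp only [List.tail_cons, List.zip_cons_cons, List.all_cons, Bool.and_eq_true,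
        List.isChain_cons_cons, decide_eq_true_eq]
      exact and_congr Iff.rfl (by simpa using ih)

-- the two loops agree under the invariant pointer = (if rose then some big else none)
theorem loop_eq (xs : List Int) : ∀ (big : Int) (rose : Bool),
    solveLoop big (if rose then some big else none) xs = solveAltLoop big rose xs := by
  induction xs with
  | nil => intro big rose; rfl
  | cons num rest ih =>
    intro big rose
    by_cases hgt : num > big
    · have h1 : ¬ num < num := lt_irrefl num
      simp only [solveLoop, solveAltLoop, if_pos hgt, h1, if_false]
      exact ih num true
    · simp only [solveLoop, solveAltLoop, if_neg hgt]
      by_cases hlt : num < big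
      · cases rose with
        | false => simp [hlt, solveLtPointer]
        | true => simp [hlt, solveLtPointer]
      · simp only [if_neg hlt]
        exact ih big rose

-- A's loop on a::rest with big = a behaves as the loop on rest (first step is a no-op)
theorem loop_head (a : Int) (rest : List Int) :
    solveLoop a none (a :: rest) = solveLoop a none rest := by
  simp [solveLoop]

-- ===== VERDICT (by name: the statement is the Claim_ definition above) =====
theorem solve_spec : Claim_equal_solve := by
  unfold Claim_equal_solve
  intro arr _
  unfold Spec_solve solve solve_alt
  rw [PySem.List.slice_from_one]
  by_cases hA : arr.Pairwise (· ≤ ·)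
  · rw [if_pos ((sorted_id_iff_pairwise arr).mpr hA)]
    rw [if_pos ((zip_all_le_iff arr).mpr hA)]
  · rw [if_neg (fun h => hA ((sorted_id_iff_pairwise arr).mp h))]
    rw [if_neg (fun h => hA ((zip_all_le_iff arr).mp h))]
    by_cases hD : arr.Pairwise (· ≥ ·)
    · rw [if_pos ((sorted_id_rev_iff_pairwise arr).mpr hD)]
      rw [if_pos ((zip_all_ge_iff arr).mpr hD)]
    · rw [if_neg (fun h => hD ((sorted_id_rev_iff_pairwise arr).mp h))]
      rw [if_neg (fun h => hD ((zip_all_ge_iff arr).mp h))]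
      cases arr with
      | nil => rfl
      | cons a rest =>
        simp only
        rw [loop_head]
        have := loop_eq rest a false
        simpa using this
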